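-- pv_equiv track=rewrite | github.com/MichalFedorek420/II-rok-python | Advent_Calendar/st_day.py | elves_shit
-- ===== SOURCE A (Python) =====
-- def elves_shit(info_from_elves):
--
--     list_of_all_digits = []
--     list_of_digits = []
--     help_list = []
--     sum = 0
--
--     for i in info_from_elves.split():
--         for j in i:
--
--             if j.isdigit():
--                 list_of_digits.append(j)
--
--
--             else:
--                 continue
--         list_of_digits.append("|")
--
--     for i in list_of_digits:
--         if i == "|":
--             if help_list:
--                 list_of_all_digits.append("".join(help_list))
--                 help_list = []
--         else:
--             help_list.append(i)
--
--     for i in list_of_all_digits: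
--         small_list = [_ for _ in i]
--         git = small_list[0] + small_list[-1]
--         sum += int(git)
--
--     return sum
-- ===== SOURCE B (Python) =====
-- def elves_shit(info_from_elves):
--     total = 0
--     for token in info_from_elves.split():
--         digits = [c for c in token if c.isdigit()]
--         if digits:
--             total += int(digits[0] + digits[-1])
--     return total
-- ===== Notes on version B (the rewrite author's own statement) =====
-- stated objective: simpler
-- what changed: One direct pass over the tokens summing int(first_digit+last_digit) per token, replacing A's three passes over a sentinel-delimited intermediate list.
import Mathlib
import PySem

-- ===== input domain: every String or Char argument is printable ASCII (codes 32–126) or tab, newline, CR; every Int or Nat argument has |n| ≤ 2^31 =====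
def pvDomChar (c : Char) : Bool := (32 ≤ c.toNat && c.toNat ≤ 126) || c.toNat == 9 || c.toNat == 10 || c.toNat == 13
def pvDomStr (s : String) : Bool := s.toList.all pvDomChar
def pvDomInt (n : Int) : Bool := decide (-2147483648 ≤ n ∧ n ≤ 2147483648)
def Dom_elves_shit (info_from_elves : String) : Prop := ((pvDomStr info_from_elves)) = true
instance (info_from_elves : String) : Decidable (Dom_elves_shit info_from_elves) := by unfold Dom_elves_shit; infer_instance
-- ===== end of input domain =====

-- B replaces A's three passes over a sentinel-delimited intermediate list with one direct
-- pass over the tokens (simpler decomposition, same asymptotic cost).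

-- ===== PORT A =====
def elves_shit (info_from_elves : String) : Int :=
  -- pass 1: collect each token's digit characters, '|' as sentinel after each token
  let list_of_digits : List Char :=
    (PySem.Str.split₀ info_from_elves).foldl
      (fun ld i =>
        (i.toList.foldl (fun ld2 j => if PySem.Chars.isdigit j then ld2 ++ [j] else ld2) ld)
          ++ ['|'])
      []
  -- pass 2: regroup between sentinels ('if help_list:' = nonempty test)
  let p : List String × List Char :=
    list_of_digits.foldl
      (fun st i =>
        if i = '|' then
          if st.2 ≠ [] then (st.1 ++ [String.ofList st.2], ([] : List Char)) else st
        else (st.1, st.2 ++ [i]))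
      ([], [])
  -- pass 3: int(first char + last char); pyGet?/ofStr? never return none here (groups are
  -- nonempty all-digit strings), so .getD only names the unreachable branch
  p.1.foldl
    (fun sum i =>
      let small_list := i.toList
      let git := String.ofList [(PySem.List.pyGet? small_list 0).getD ' ',
                            (PySem.List.pyGet? small_list (-1)).getD ' ']
      sum + (PySem.Int.ofStr? git).getD 0)
    0

-- ===== PORT B =====
def elves_shit_alt (info_from_elves : String) : Int :=
  (PySem.Str.split₀ info_from_elves).foldl
    (fun total token =>
      let digits := token.toList.filter (fun c => PySem.Chars.isdigit c)
      if digits = [] then total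
      else
        -- digits[0] / digits[-1]: pyGet?/ofStr? never none here (digits nonempty, all digits)
        total + (PySem.Int.ofStr? (String.ofList [(PySem.List.pyGet? digits 0).getD ' ',
                                              (PySem.List.pyGet? digits (-1)).getD ' '])).getD 0)
    0

-- ===== PRECONDITION & SPEC =====
def Spec_elves_shit (info_from_elves : String) (out : Int) : Prop := out = elves_shit_alt info_from_elves
instance (info_from_elves : String) (out : Int) : Decidable (Spec_elves_shit info_from_elves out) := by unfold Spec_elves_shit; infer_instance

-- ===== CLAIM (what is proved, stated in full; the proofs are below) =====
def Claim_equal_elves_shit : Prop := ∀ (info_from_elves : String), Dom_elves_shit info_from_elves → Spec_elves_shit info_from_elves (elves_shit info_from_elves)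

-- ===== LEMMAS AND PROOFS =====

-- the digit characters of one token
def pvDig (t : String) : List Char := t.toList.filter (fun c => PySem.Chars.isdigit c)

-- pass-2 step function of A
def pvStep (st : List String × List Char) (i : Char) : List String × List Char :=
  if i = '|' then
    if st.2 ≠ [] then (st.1 ++ [String.ofList st.2], ([] : List Char)) else st
  else (st.1, st.2 ++ [i])

-- A's pass-1 inner loop is a filter
theorem pvInner (cs : List Char) (ld : List Char) :
    cs.foldl (fun ld2 j => if PySem.Chars.isdigit j then ld2 ++ [j] else ld2) ld
      = ld ++ cs.filter (fun c => PySem.Chars.isdigit c) := by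
  induction cs generalizing ld with
  | nil => simp
  | cons c cs ih =>
    simp only [List.foldl_cons, List.filter_cons]
    by_cases h : PySem.Chars.isdigit c <;> simp [h, ih]

-- A's pass 1 flattens to a flatMap with sentinels
theorem pvPass1 (ts : List String) (acc : List Char) :
    ts.foldl
      (fun ld i =>
        (i.toList.foldl (fun ld2 j => if PySem.Chars.isdigit j then ld2 ++ [j] else ld2) ld)
          ++ ['|']) acc
      = acc ++ ts.flatMap (fun t => pvDig t ++ ['|']) := by
  induction ts generalizing acc with
  | nil => simp
  | cons t ts ih => simp [pvInner, pvDig, List.append_assoc, List.flatMap]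

theorem pvDigitNeBar (c : Char) (h : PySem.Chars.isdigit c = true) : ¬ (c = '|') := by
  intro e; subst e; exact absurd h (by decide)

-- pass 2 over a run of digit characters just appends them to help_list
theorem pvStepRun (ds : List Char) (acc : List String) (help : List Char)
    (h : ∀ c ∈ ds, PySem.Chars.isdigit c = true) :
    ds.foldl pvStep (acc, help) = (acc, help ++ ds) := by
  induction ds generalizing help with
  | nil => simp
  | cons c ds ih =>
    have hc := pvDigitNeBar c (h c (by simp))
    simp only [List.foldl_cons, pvStep, hc, ite_false]
    rw [ih (help ++ [c]) (fun x hx => h x (by simp [hx]))]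
    simp

-- pass 2 over the whole sentinel-delimited list produces the nonempty digit groups
theorem pvPass2 (ts : List String) (acc : List String) :
    (ts.flatMap (fun t => pvDig t ++ ['|'])).foldl pvStep (acc, []) =
      (acc ++ ts.filterMap (fun t => if pvDig t = [] then none else some (String.ofList (pvDig t))), []) := by
  induction ts generalizing acc with
  | nil => simp
  | cons t ts ih =>
    have hall : ∀ c ∈ pvDig t, PySem.Chars.isdigit c = true := by
      intro c hc; exact (List.mem_filter.mp hc).2
    simp only [List.flatMap_cons, List.foldl_append, List.filterMap_cons]
    rw [pvStepRun (pvDig t) acc [] hall]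
    simp only [List.nil_append, List.foldl_cons]
    by_cases h : pvDig t = []
    · simp [pvStep, h, ih]
    · rw [show pvStep (acc, pvDig t) '|' = (acc ++ [String.ofList (pvDig t)], []) by
        simp [pvStep, h]]
      rw [List.foldl_nil, ih, if_neg h]
      simp

-- pass 3 over the groups equals B's single pass over the tokens
theorem pvPass3 (ts : List String) (s : Int) :
    (ts.filterMap (fun t => if pvDig t = [] then none else some (String.ofList (pvDig t)))).foldl
      (fun sum i =>
        sum + (PySem.Int.ofStr? (String.ofList [(PySem.List.pyGet? i.toList 0).getD ' ',
                                            (PySem.List.pyGet? i.toList (-1)).getD ' '])).getD 0) s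
    = ts.foldl
        (fun total token =>
          let digits := token.toList.filter (fun c => PySem.Chars.isdigit c)
          if digits = [] then total
          else total + (PySem.Int.ofStr? (String.ofList [(PySem.List.pyGet? digits 0).getD ' ',
                                                     (PySem.List.pyGet? digits (-1)).getD ' '])).getD 0) s := by
  induction ts generalizing s with
  | nil => simp
  | cons t ts ih =>
    simp only [List.filterMap_cons, List.foldl_cons]
    by_cases h : pvDig t = []
    · rw [if_pos h, ih]
      congr 1
      rw [show t.toList.filter (fun c => PySem.Chars.isdigit c) = pvDig t from rfl, if_pos h]
    · rw [if_neg h]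
      simp only [List.foldl_cons]
      rw [ih]
      congr 1
      rw [show t.toList.filter (fun c => PySem.Chars.isdigit c) = pvDig t from rfl]
      rw [if_neg h]
      simp

-- ===== VERDICT (by name: the statement is the Claim_ definition above) =====
theorem elves_shit_spec : Claim_equal_elves_shit := by
  intro s _
  unfold Spec_elves_shit elves_shit elves_shit_alt
  simp only []
  rw [pvPass1 (PySem.Str.split₀ s) []]
  rw [show (fun (st : List String × List Char) (i : Char) =>
        if i = '|' then
          if st.2 ≠ [] then (st.1 ++ [String.ofList st.2], ([] : List Char)) else st
        else (st.1, st.2 ++ [i])) = pvStep from rfl]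
  rw [List.nil_append, pvPass2 (PySem.Str.split₀ s) []]
  simp only [List.nil_append]
  exact pvPass3 (PySem.Str.split₀ s) 0
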